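-- pv_equiv track=rewrite | github.com/xyt2000/flask-scrapy-imdb | recommendationDemo/recommendationOfUser.py | getShowMovie
-- ===== SOURCE A (Python) =====
-- def getShowMovie(MovieList,num):
--     showList = []
--     if num == 1:
--         return MovieList
--     else:
--         i = 0
--         j = 0
--         m = 0
--         while i <12:
--             m = i + 1
--             showList.append(MovieList[j])
--             if m % num == 0:
--                 j = (j+13+1)%(13*num)
--             else:
--                 j = j + 13
--             i = i + 1
--         return showList
-- ===== SOURCE B (Python) =====
-- def getShowMovie(MovieList, num):
--     if num == 1:
--         return MovieList
--     return [MovieList[(p // num) + 13 * (p % num)] for p in range(12)]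
-- ===== Notes on version B (the rewrite author's own statement) =====
-- stated objective: simpler
-- what changed: The stepwise j-advance/wrap loop with counters i, j, m is replaced by a single comprehension that computes each of the 12 indices in closed form as (p // num) + 13 * (p % num).
-- outside the precondition, e.g. on getShowMovie([1, 2, 3], 0): A raises ZeroDivisionError, B raises ZeroDivisionError; on getShowMovie([1, 2, 3], 2): A raises IndexError, B raises IndexError
import Mathlib
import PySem

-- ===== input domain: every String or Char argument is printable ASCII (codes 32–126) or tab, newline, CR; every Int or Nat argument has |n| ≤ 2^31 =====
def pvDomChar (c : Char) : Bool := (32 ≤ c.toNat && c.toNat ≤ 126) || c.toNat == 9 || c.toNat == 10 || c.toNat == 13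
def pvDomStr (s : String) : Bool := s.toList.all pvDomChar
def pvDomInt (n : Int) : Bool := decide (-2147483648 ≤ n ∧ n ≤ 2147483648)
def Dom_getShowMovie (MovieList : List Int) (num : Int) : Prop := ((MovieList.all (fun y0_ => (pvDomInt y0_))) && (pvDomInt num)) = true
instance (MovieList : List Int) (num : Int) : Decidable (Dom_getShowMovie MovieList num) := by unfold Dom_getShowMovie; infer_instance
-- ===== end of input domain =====

-- B replaces A's stepwise j-advance/wrap index bookkeeping by the closed-form index
-- (p // num) + 13 * (p % num) for each of the 12 positions (objective: simpler).


-- ===== PORT A =====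
-- A's while loop (runs exactly 12 times: i = 0..11); fuel = remaining iterations,
-- state = (i, j, showList), exactly A's variables.
def getShowMovieLoop (MovieList : List Int) (num : Int) : Nat → Int → Int → List Int → List Int
  | 0, _, _, showList => showList
  | n+1, i, j, showList =>
      let m := i + 1
      let showList' := showList ++ [(PySem.List.pyGet? MovieList j).getD 0]
      if PySem.Int.mod m num = 0 then
        getShowMovieLoop MovieList num n (i+1) (PySem.Int.mod (j+13+1) (13*num)) showList'
      else
        getShowMovieLoop MovieList num n (i+1) (j+13) showList'

def getShowMovie (MovieList : List Int) (num : Int) : List Int :=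
  if num = 1 then MovieList
  else getShowMovieLoop MovieList num 12 0 0 []

-- ===== PORT B =====
def getShowMovie_alt (MovieList : List Int) (num : Int) : List Int :=
  if num = 1 then MovieList
  else (PySem.List.pyRange 0 12 1).map
    (fun p => (PySem.List.pyGet? MovieList (PySem.Int.floordiv p num + 13 * PySem.Int.mod p num)).getD 0)

-- ===== PRECONDITION & SPEC =====
-- Pre_ excludes num ≤ 0, where A either raises ZeroDivisionError (num = 0) or selects the 12
-- elements via Python negative-index wraparound with a negative modulus — an accident of the
-- stepping arithmetic no caller would specify; it also excludes inputs where an accessed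
-- index is out of range (A raises IndexError there).
def Pre_getShowMovie (MovieList : List Int) (num : Int) : Prop :=
  num = 1 ∨ (2 ≤ num ∧ ∀ p ∈ List.range 12, (p : Int) / num + 13 * ((p : Int) % num) < (MovieList.length : Int))
instance (MovieList : List Int) (num : Int) : Decidable (Pre_getShowMovie MovieList num) := by unfold Pre_getShowMovie; infer_instance

def pvWitness_getShowMovie : List Int × Int := (List.replicate 19 0, 2)

def Spec_getShowMovie (MovieList : List Int) (num : Int) (out : List Int) : Prop := out = getShowMovie_alt MovieList num
instance (MovieList : List Int) (num : Int) (out : List Int) : Decidable (Spec_getShowMovie MovieList num out) := by unfold Spec_getShowMovie; infer_instance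

-- ===== CLAIM (what is proved, stated in full; the proofs are below) =====
def Claim_equal_getShowMovie : Prop := ∀ (MovieList : List Int) (num : Int), Dom_getShowMovie MovieList num → Pre_getShowMovie MovieList num → Spec_getShowMovie MovieList num (getShowMovie MovieList num)

-- ===== LEMMAS AND PROOFS =====

-- the j-update of A's loop maps the closed-form index of position i to that of position i+1
lemma step_idx (num : Int) (h2 : 2 ≤ num) (i : Nat) (hi : i < 12) :
    (if PySem.Int.mod ((i : Int) + 1) num = 0
      then PySem.Int.mod ((i : Int)/num + 13*((i : Int)%num) + 13 + 1) (13*num)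
      else (i : Int)/num + 13*((i : Int)%num) + 13)
    = ((i : Int)+1)/num + 13*(((i : Int)+1)%num) := by
  have hpos : (0:Int) < num := by omega
  set a : Int := (i : Int) with ha
  have ha0 : 0 ≤ a := by positivity
  have ha12 : a < 12 := by omega
  have hqr : num * (a / num) + a % num = a := Int.mul_ediv_add_emod a num
  have hr0 : 0 ≤ a % num := Int.emod_nonneg a (by omega)
  have hrlt : a % num < num := Int.emod_lt_of_pos a hpos
  have hq0 : 0 ≤ a / num := Int.ediv_nonneg ha0 (by omega)
  have hq5 : a / num ≤ 5 := by nlinarith [hqr, hr0, hq0]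
  rw [PySem.Int.mod_eq_emod_of_pos hpos, PySem.Int.mod_eq_emod_of_pos (by positivity)]
  by_cases h : (a + 1) % num = 0
  · rw [if_pos h, h]
    have hrn : a % num + 1 = num := by
      by_cases hc : a % num + 1 < num
      · exfalso
        have h' : a + 1 = (a % num + 1) + num * (a / num) := by omega
        have : (a + 1) % num = a % num + 1 := by
          rw [h', Int.add_mul_emod_self_left]
          exact Int.emod_eq_of_lt (by omega) hc
        omega
      · omega
    have hA : a + 1 = num * (a / num + 1) := by nlinarith [hqr]
    have hdiv : (a + 1) / num = a / num + 1 := by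
      rw [hA, Int.mul_ediv_cancel_left _ (by omega)]
    rw [hdiv]
    have hE : a / num + 13*(a % num) + 13 + 1 = (a / num + 1) + 13*num := by omega
    rw [hE, Int.add_emod_right]
    have : (a / num + 1) % (13*num) = a / num + 1 :=
      Int.emod_eq_of_lt (by omega) (by nlinarith)
    omega
  · rw [if_neg h]
    have hrn : a % num + 1 < num := by
      rcases lt_or_eq_of_le (by omega : a % num + 1 ≤ num) with hc | hc
      · exact hc
      · exfalso
        have hA : a + 1 = num * (a / num + 1) := by nlinarith [hqr]
        have : (a + 1) % num = 0 := by rw [hA]; exact Int.mul_emod_right _ _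
        omega
    have hrepr : a + 1 = (a % num + 1) + num * (a / num) := by omega
    have hmod : (a + 1) % num = a % num + 1 := by
      rw [hrepr, Int.add_mul_emod_self_left]
      exact Int.emod_eq_of_lt (by omega) hrn
    have hdiv : (a + 1) / num = a / num := by
      rw [hrepr, Int.add_mul_ediv_left _ _ (by omega : num ≠ 0),
        Int.ediv_eq_zero_of_lt (by omega) hrn]
      omega
    rw [hmod, hdiv]; ring

-- loop invariant: started at the closed-form index of position i, A's loop emits the
-- closed-form indices of positions i, i+1, …, i+n-1
lemma loopA_eq (L : List Int) (num : Int) (h2 : 2 ≤ num) :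
    ∀ (n i : Nat) (acc : List Int), n + i = 12 →
      getShowMovieLoop L num n (i : Int) ((i : Int)/num + 13*((i : Int)%num)) acc
        = acc ++ (List.range n).map
            (fun k => (PySem.List.pyGet? L (((i+k : Nat) : Int)/num + 13*(((i+k : Nat) : Int)%num))).getD 0) := by
  intro n
  induction n with
  | zero => intro i acc _; simp [getShowMovieLoop]
  | succ n ih =>
    intro i acc h
    rw [getShowMovieLoop]
    have hi : i < 12 := by omega
    have hstep := step_idx num h2 i hi
    by_cases hc : PySem.Int.mod ((i : Int) + 1) num = 0
    · rw [if_pos hc]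
      rw [if_pos hc] at hstep
      have hcast : ((i : Int) + 1) = ((i + 1 : Nat) : Int) := by push_cast; ring
      rw [hstep, hcast, ih (i+1) _ (by omega)]
      rw [List.range_succ_eq_map, List.map_cons, List.map_map]
      simp only [List.append_assoc, List.cons_append, List.nil_append, Nat.add_zero]
      congr 1
      congr 1
      apply List.map_congr_left
      intro k _
      have h3 : i + 1 + k = i + (k + 1) := by omega
      rw [h3]
      simp only [Function.comp_apply, Nat.succ_eq_add_one]
    · rw [if_neg hc]
      rw [if_neg hc] at hstep
      have hcast : ((i : Int) + 1) = ((i + 1 : Nat) : Int) := by push_cast; ring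
      rw [hstep, hcast, ih (i+1) _ (by omega)]
      rw [List.range_succ_eq_map, List.map_cons, List.map_map]
      simp only [List.append_assoc, List.cons_append, List.nil_append, Nat.add_zero]
      congr 1
      congr 1
      apply List.map_congr_left
      intro k _
      have h3 : i + 1 + k = i + (k + 1) := by omega
      rw [h3]
      simp only [Function.comp_apply, Nat.succ_eq_add_one]

-- ===== VERDICT (by name: the statement is the Claim_ definition above) =====
theorem getShowMovie_spec : Claim_equal_getShowMovie := by
  intro L num _ hpre
  unfold Spec_getShowMovie getShowMovie getShowMovie_alt
  rcases hpre with h1 | ⟨h2, _⟩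
  · simp [h1]
  · have hne : ¬ (num = 1) := by omega
    have hpos : (0:Int) < num := by omega
    rw [if_neg hne, if_neg hne]
    have h0 : (0 : Int) = ((0 : Nat) : Int)/num + 13*(((0 : Nat) : Int)%num) := by simp
    rw [show getShowMovieLoop L num 12 0 0 [] =
        getShowMovieLoop L num 12 ((0:Nat) : Int) (((0:Nat) : Int)/num + 13*(((0:Nat) : Int)%num)) [] by
      rw [← h0]; rfl]
    rw [loopA_eq L num h2 12 0 [] (by omega)]
    rw [PySem.List.pyRange_one]
    simp only [PySem.Int.floordiv_eq_ediv_of_pos hpos, PySem.Int.mod_eq_emod_of_pos hpos]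
    have h12 : ((12 : Int) - 0).toNat = 12 := by decide
    rw [h12, List.nil_append, List.map_map]
    apply List.map_congr_left
    intro k _
    simp [Function.comp]
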